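-- pv_equiv track=rewrite | github.com/aheuillet/D-DARTS | visualize.py | parse
-- ===== SOURCE A (Python) =====
-- def parse(genotype):
--   op_names, tos, froms = zip(*genotype)
--   ops = {}
--   for name_i, to_i, from_i in zip(op_names, tos, froms):
--     if str(to_i) in ops.keys():
--       if str(from_i) in ops[str(to_i)]:
--         ops[str(to_i)][str(from_i)] += [name_i]
--       else:
--         ops[str(to_i)][str(from_i)] = []
--         ops[str(to_i)][str(from_i)] += [name_i]
--     else:
--       ops[str(to_i)] = {}
--       ops[str(to_i)][str(from_i)] = []
--       ops[str(to_i)][str(from_i)] += [name_i]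
--   return ops
-- ===== SOURCE B (Python) =====
-- def parse(genotype):
--     op_names, tos, froms = zip(*genotype)
--     triples = [(n, str(t), str(f)) for n, t, f in zip(op_names, tos, froms)]
--     to_keys = list(dict.fromkeys(t for _, t, _ in triples))
--     return {t: {f: [n for n, t2, f2 in triples if t2 == t and f2 == f]
--                 for f in dict.fromkeys(f2 for _, t2, f2 in triples if t2 == t)}
--             for t in to_keys}
-- ===== Notes on version B (the rewrite author's own statement) =====
-- stated objective: alternative
-- what changed: Instead of A's single pass that mutates nested dicts entry by entry, B precomputes the deduplicated key lists (dict.fromkeys) and assembles the nested dict with comprehensions that re-scan the triple list per key; insertion order is preserved because dedup keeps first occurrences.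
import Mathlib
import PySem

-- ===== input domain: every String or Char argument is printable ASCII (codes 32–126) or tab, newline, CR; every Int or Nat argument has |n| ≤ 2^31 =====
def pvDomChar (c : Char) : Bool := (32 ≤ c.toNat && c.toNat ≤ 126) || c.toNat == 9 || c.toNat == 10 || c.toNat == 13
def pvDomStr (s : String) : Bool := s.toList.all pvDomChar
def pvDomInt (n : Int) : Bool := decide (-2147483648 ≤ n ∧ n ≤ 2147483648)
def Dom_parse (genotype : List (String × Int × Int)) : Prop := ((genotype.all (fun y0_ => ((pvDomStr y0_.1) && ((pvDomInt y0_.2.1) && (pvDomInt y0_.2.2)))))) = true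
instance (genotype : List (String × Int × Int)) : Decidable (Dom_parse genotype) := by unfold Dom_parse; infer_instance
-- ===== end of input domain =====

-- B replaces A's single mutating pass with dedup'd key lists + per-key comprehension scans (alternative decomposition, same values).


-- ===== PORT A =====
-- loop body of A: str() the endpoints, then the three-way nested-dict mutation, transcribed with Dict.insert
def parseStep (ops : PySem.Dict String (PySem.Dict String (List String)))
    (x : String × Int × Int) : PySem.Dict String (PySem.Dict String (List String)) :=
  let name := x.1
  let t := PySem.Int.toStr x.2.1
  let f := PySem.Int.toStr x.2.2
  match ops.get? t with
  | some inner =>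
      match inner.get? f with
      | some l => ops.insert t (inner.insert f (l ++ [name]))
      | none   => ops.insert t ((inner.insert f []).insert f ([] ++ [name]))
  | none =>
      ops.insert t (((PySem.Dict.empty).insert f []).insert f ([] ++ [name]))

def parse (genotype : List (String × Int × Int)) : List (String × List (String × List String)) :=
  ((genotype.foldl parseStep PySem.Dict.empty).items).map (fun p => (p.1, p.2.items))

-- ===== PORT B =====
-- triples = [(n, str(t), str(f)) ...]
def altTriples (genotype : List (String × Int × Int)) : List (String × String × String) :=
  genotype.map (fun x => (x.1, PySem.Int.toStr x.2.1, PySem.Int.toStr x.2.2))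
-- [n for n, t2, f2 in triples if t2 == t and f2 == f]
def altNames (ts : List (String × String × String)) (t f : String) : List String :=
  (ts.filter (fun x => x.2.1 == t && x.2.2 == f)).map (fun x => x.1)
-- {f: names for f in dict.fromkeys(f2 for _, t2, f2 in triples if t2 == t)}
def altInner (ts : List (String × String × String)) (t : String) : List (String × List String) :=
  (PySem.List.dedup ((ts.filter (fun x => x.2.1 == t)).map (fun x => x.2.2))).map
    (fun f => (f, altNames ts t f))
def parse_alt (genotype : List (String × Int × Int)) : List (String × List (String × List String)) :=
  let triples := altTriples genotype
  (PySem.List.dedup (triples.map (fun x => x.2.1))).map (fun t => (t, altInner triples t))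

-- ===== PRECONDITION & SPEC =====
-- Pre_ excludes only the empty genotype, on which A's `zip(*genotype)` unpacking raises ValueError (B raises there too).
def Pre_parse (genotype : List (String × Int × Int)) : Prop := genotype ≠ []
instance (genotype : List (String × Int × Int)) : Decidable (Pre_parse genotype) := by unfold Pre_parse; infer_instance
def pvWitness_parse : (List (String × Int × Int)) := [("sep_conv_3", 1, 0), ("skip_connect", 1, 0), ("max_pool_3x3", 2, 1)]

def Spec_parse (genotype : List (String × Int × Int)) (out : List (String × List (String × List String))) : Prop := out = parse_alt genotype
instance (genotype : List (String × Int × Int)) (out : List (String × List (String × List String))) : Decidable (Spec_parse genotype out) := by unfold Spec_parse; infer_instance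

-- ===== CLAIM (what is proved, stated in full; the proofs are below) =====
def Claim_equal_parse : Prop := ∀ (genotype : List (String × Int × Int)), Dom_parse genotype → Pre_parse genotype → Spec_parse genotype (parse genotype)

-- ===== LEMMAS AND PROOFS =====

-- B's nested list, packed back into the nested Dict shape A's loop maintains
def fromN (l : List (String × List (String × List String))) :
    PySem.Dict String (PySem.Dict String (List String)) :=
  PySem.Dict.mk (l.map (fun p => (p.1, PySem.Dict.mk p.2)))

-- A's loop body on a precomputed triple
def tstep (ops : PySem.Dict String (PySem.Dict String (List String)))
    (x : String × String × String) : PySem.Dict String (PySem.Dict String (List String)) :=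
  let name := x.1
  let t := x.2.1
  let f := x.2.2
  match ops.get? t with
  | some inner =>
      match inner.get? f with
      | some l => ops.insert t (inner.insert f (l ++ [name]))
      | none   => ops.insert t ((inner.insert f []).insert f ([] ++ [name]))
  | none =>
      ops.insert t (((PySem.Dict.empty).insert f []).insert f ([] ++ [name]))

theorem get?_keyed {ν : Type} (ks : List String) (g : String → ν) (t : String) :
    (PySem.Dict.mk (ks.map (fun k => (k, g k)))).get? t = if t ∈ ks then some (g t) else none := by
  induction ks with
  | nil => simp [PySem.Dict.get?]
  | cons k ks ih =>
      by_cases h : k = t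
      · subst h; simp [PySem.Dict.get?]
      · simp only [List.map_cons, PySem.Dict.get?_mk_cons]
        rw [if_neg (by simp [h])]
        simpa [List.mem_cons, Ne.symm h] using ih

theorem contains_keyed {ν : Type} (ks : List String) (g : String → ν) (t : String) :
    (PySem.Dict.mk (ks.map (fun k => (k, g k)))).contains t = decide (t ∈ ks) := by
  induction ks with
  | nil => simp [PySem.Dict.contains]
  | cons k ks ih =>
      simp only [PySem.Dict.contains, List.map_cons, List.any_cons] at ih ⊢
      by_cases h : k = t
      · subst h; simp
      · have h1 : (k == t) = false := by simp [h]
        have h2 : decide (t ∈ k :: ks) = decide (t ∈ ks) := by simp [List.mem_cons, Ne.symm h]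
        rw [h1, h2, Bool.false_or, ih]

theorem insert_keyed_mem {ν : Type} (ks : List String) (g : String → ν) (t : String) (v : ν)
    (h : t ∈ ks) :
    (PySem.Dict.mk (ks.map (fun k => (k, g k)))).insert t v
      = PySem.Dict.mk (ks.map (fun k => (k, if k = t then v else g k))) := by
  have hc : (PySem.Dict.mk (ks.map (fun k => (k, g k)))).contains t = true := by
    rw [contains_keyed]; simpa using h
  apply PySem.Dict.ext
  rw [PySem.Dict.items_insert_of_contains _ _ hc]
  show (ks.map _).map _ = _
  rw [List.map_map]
  refine List.map_congr_left (fun k _ => ?_)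
  by_cases hk : k = t
  · subst hk; simp
  · simp [hk]

theorem insert_keyed_not_mem {ν : Type} (ks : List String) (g : String → ν) (t : String) (v : ν)
    (h : t ∉ ks) :
    (PySem.Dict.mk (ks.map (fun k => (k, g k)))).insert t v
      = PySem.Dict.mk (ks.map (fun k => (k, g k)) ++ [(t, v)]) := by
  have hc : (PySem.Dict.mk (ks.map (fun k => (k, g k)))).contains t = false := by
    rw [contains_keyed]; simpa using h
  apply PySem.Dict.ext
  rw [PySem.Dict.items_insert_of_not_contains _ _ hc]

theorem dedup_append_singleton {α : Type} [BEq α] [LawfulBEq α] (l : List α) (a : α) :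
    PySem.List.dedup (l ++ [a])
      = if a ∈ PySem.List.dedup l then PySem.List.dedup l else PySem.List.dedup l ++ [a] := by
  simp only [PySem.List.dedup_eq_ofList, PySem.Set.ofList_eq_foldl, List.foldl_append,
    List.foldl_cons, List.foldl_nil]
  show PySem.Set.add _ a = _
  simp [PySem.Set.add, PySem.Set.contains]

-- appending one triple with a DIFFERENT `to` endpoint changes nothing at key t
theorem altNames_append_ne (p : List (String × String × String)) (x : String × String × String)
    (t f : String) (h : ¬ (x.2.1 = t ∧ x.2.2 = f)) :
    altNames (p ++ [x]) t f = altNames p t f := by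
  unfold altNames
  rw [List.filter_append]
  have : List.filter (fun y => y.2.1 == t && y.2.2 == f) [x] = [] := by
    simp only [List.filter_cons, List.filter_nil]
    rw [if_neg]
    simp only [Bool.and_eq_true, beq_iff_eq]
    exact fun hc => h hc
  rw [this, List.append_nil]

theorem altNames_append_eq (p : List (String × String × String)) (x : String × String × String)
    (h1 : x.2.1 = t) (h2 : x.2.2 = f) :
    altNames (p ++ [x]) t f = altNames p t f ++ [x.1] := by
  unfold altNames
  rw [List.filter_append]
  have : List.filter (fun y => y.2.1 == t && y.2.2 == f) [x] = [x] := by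
    simp [h1, h2]
  rw [this, List.map_append]; rfl

theorem filter_append_ne (p : List (String × String × String)) (x : String × String × String)
    (t : String) (h : x.2.1 ≠ t) :
    (p ++ [x]).filter (fun y => y.2.1 == t) = p.filter (fun y => y.2.1 == t) := by
  rw [List.filter_append]
  have : List.filter (fun y => y.2.1 == t) [x] = [] := by simp [h]
  rw [this, List.append_nil]

theorem filter_append_eq (p : List (String × String × String)) (x : String × String × String)
    (t : String) (h : x.2.1 = t) :
    (p ++ [x]).filter (fun y => y.2.1 == t) = p.filter (fun y => y.2.1 == t) ++ [x] := by
  rw [List.filter_append]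
  have : List.filter (fun y => y.2.1 == t) [x] = [x] := by simp [h]
  rw [this]

theorem altInner_append_ne (p : List (String × String × String)) (x : String × String × String)
    (t : String) (h : x.2.1 ≠ t) :
    altInner (p ++ [x]) t = altInner p t := by
  unfold altInner
  rw [filter_append_ne p x t h]
  refine List.map_congr_left (fun f _ => ?_)
  rw [altNames_append_ne p x t f (by intro hc; exact h hc.1)]

-- if f never occurs as a `from` of a triple with `to` = t in p, then the name list at (t,f) is empty
theorem altNames_nil_of_not_mem (p : List (String × String × String)) (t f : String)
    (h : f ∉ (p.filter (fun y => y.2.1 == t)).map (fun y => y.2.2)) :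
    altNames p t f = [] := by
  unfold altNames
  rw [show (fun (x : String × String × String) => x.2.1 == t && x.2.2 == f)
        = (fun x => (x.2.2 == f) && (x.2.1 == t)) by funext x; rw [Bool.and_comm]]
  rw [← List.filter_filter]
  have : List.filter (fun (x : String × String × String) => x.2.2 == f)
      (List.filter (fun x => x.2.1 == t) p) = [] := by
    rw [List.filter_eq_nil_iff]
    intro y hy
    simp only [beq_iff_eq]
    intro hf
    exact h (by rw [← hf]; exact List.mem_map_of_mem hy)
  rw [this]; rfl

-- the main induction: the dict built by A's loop over ts is B's nested structure
theorem fold_eq (ts : List (String × String × String)) :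
    ts.foldl tstep PySem.Dict.empty
      = fromN ((PySem.List.dedup (ts.map (fun x => x.2.1))).map (fun t => (t, altInner ts t))) := by
  induction ts using List.reverseRecOn with
  | nil => simp [fromN, PySem.List.dedup, PySem.Set.ofList, PySem.Set.empty, PySem.Dict.empty]
  | append_singleton p x ih =>
      obtain ⟨n, t, f⟩ := x
      rw [List.foldl_append, List.foldl_cons, List.foldl_nil, ih]
      set ks := PySem.List.dedup (p.map (fun x => x.2.1)) with hks
      set fsrc := (p.filter (fun y => y.2.1 == t)).map (fun y => y.2.2) with hfsrc
      set fs := PySem.List.dedup fsrc with hfs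
      have hkeys : (p ++ [(n, t, f)]).map (fun x => x.2.1) = p.map (fun x => x.2.1) ++ [t] := by
        simp
      have hfromN : fromN (ks.map (fun t' => (t', altInner p t')))
          = PySem.Dict.mk (ks.map (fun t' => (t', PySem.Dict.mk (altInner p t')))) := by
        unfold fromN; rw [List.map_map]; rfl
      rw [hfromN]
      show tstep _ (n, t, f) = _
      unfold tstep
      simp only []
      rw [get?_keyed]
      by_cases ht : t ∈ ks
      · rw [if_pos ht]
        dsimp only
        have hinner : altInner p t = fs.map (fun f' => (f', altNames p t f')) := rfl
        rw [hinner, get?_keyed]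
        have houter : PySem.List.dedup ((p ++ [(n, t, f)]).map (fun x => x.2.1)) = ks := by
          rw [hkeys, dedup_append_singleton, if_pos ht]
        by_cases hf : f ∈ fs
        · -- both keys present: the (t,f) name list grows by [n]
          rw [if_pos hf]
          dsimp only
          rw [insert_keyed_mem _ _ _ _ hf, insert_keyed_mem _ _ _ _ ht]
          unfold fromN
          rw [houter, List.map_map]
          refine congrArg PySem.Dict.mk (List.map_congr_left (fun t' ht' => ?_))
          by_cases htt : t' = t
          · subst htt
            simp only [Function.comp]
            refine congrArg (fun z => (t', PySem.Dict.mk z)) ?_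
            have : altInner (p ++ [(n, t', f)]) t'
                = fs.map (fun f' => (f', altNames (p ++ [(n, t', f)]) t' f')) := by
              unfold altInner
              rw [filter_append_eq p _ t' rfl, List.map_append]
              rw [show (List.map (fun y => y.2.2) [((n:String), (t':String), (f:String))]) = [f] from rfl]
              rw [← hfsrc, dedup_append_singleton, ← hfs, if_pos hf]
            rw [this]
            refine List.map_congr_left (fun f' hf' => ?_)
            by_cases hff : f' = f
            · subst hff
              rw [if_pos rfl, altNames_append_eq p _ rfl rfl]
            · rw [if_neg hff, altNames_append_ne p _ t' f' (by rintro ⟨_, h2⟩; exact hff h2.symm)]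
          · simp only [if_neg htt, Function.comp]
            rw [altInner_append_ne p _ t' (fun hc => htt hc.symm)]
        · -- t present, f fresh: (f, [n]) is appended to the inner dict
          rw [if_neg hf]
          dsimp only
          rw [insert_keyed_not_mem _ _ _ _ hf]
          have h2 : (PySem.Dict.mk (fs.map (fun f' => (f', altNames p t f')) ++ [(f, [])])).insert f ([] ++ [n])
              = PySem.Dict.mk (fs.map (fun f' => (f', altNames p t f')) ++ [(f, [n])]) := by
            have hc : (PySem.Dict.mk (fs.map (fun f' => (f', altNames p t f')) ++ [(f, [])])).contains f = true := by
              simp [PySem.Dict.contains]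
            apply PySem.Dict.ext
            rw [PySem.Dict.items_insert_of_contains _ _ hc]
            show (fs.map _ ++ [(f, [])]).map _ = _
            rw [List.map_append, List.map_map]
            refine congrArg₂ (· ++ ·) (List.map_congr_left (fun f' hf' => ?_)) (by simp)
            have : f' ≠ f := fun hc' => hf (hc' ▸ hf')
            simp [Function.comp, this]
          rw [h2, insert_keyed_mem _ _ _ _ ht]
          unfold fromN
          rw [houter, List.map_map]
          refine congrArg PySem.Dict.mk (List.map_congr_left (fun t' ht' => ?_))
          by_cases htt : t' = t
          · subst htt
            simp only [Function.comp]
            refine congrArg (fun z => (t', PySem.Dict.mk z)) ?_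
            have hnames : altNames p t' f = [] := altNames_nil_of_not_mem p t' f (by
              intro hc
              exact hf (by rw [hfs, PySem.List.dedup_eq_ofList, PySem.Set.mem_ofList]; exact hc))
            have : altInner (p ++ [(n, t', f)]) t'
                = (fs ++ [f]).map (fun f' => (f', altNames (p ++ [(n, t', f)]) t' f')) := by
              unfold altInner
              rw [filter_append_eq p _ t' rfl, List.map_append]
              rw [show (List.map (fun y => y.2.2) [((n:String), (t':String), (f:String))]) = [f] from rfl]
              rw [← hfsrc, dedup_append_singleton, ← hfs, if_neg hf]
            rw [this, List.map_append]
            refine congrArg₂ (· ++ ·) (List.map_congr_left (fun f' hf' => ?_)) ?_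
            · rw [altNames_append_ne p _ t' f' (by
                rintro ⟨_, h2'⟩
                exact hf (by rw [show f = f' from h2']; exact hf'))]
            · rw [show List.map (fun f' => (f', altNames (p ++ [(n, t', f)]) t' f')) [f]
                    = [(f, altNames (p ++ [(n, t', f)]) t' f)] from rfl]
              rw [altNames_append_eq p _ rfl rfl, hnames]
              rfl
          · simp only [if_neg htt, Function.comp]
            rw [altInner_append_ne p _ t' (fun hc => htt hc.symm)]
      · -- t fresh: a whole new (t, {f: [n]}) entry is appended
        rw [if_neg ht]
        dsimp only
        have hemp : ((PySem.Dict.empty : PySem.Dict String (List String)).insert f []).insert f ([] ++ [n])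
            = PySem.Dict.mk [(f, [n])] := by
          apply PySem.Dict.ext
          simp [PySem.Dict.insert, PySem.Dict.contains, PySem.Dict.empty]
        rw [hemp, insert_keyed_not_mem _ _ _ _ ht]
        have houter : PySem.List.dedup ((p ++ [(n, t, f)]).map (fun x => x.2.1)) = ks ++ [t] := by
          rw [hkeys, dedup_append_singleton, if_neg ht]
        unfold fromN
        rw [houter, List.map_map, List.map_append]
        refine congrArg₂ (fun a b => PySem.Dict.mk (a ++ b)) (List.map_congr_left (fun t' ht' => ?_)) ?_
        · simp only [Function.comp]
          rw [altInner_append_ne p _ t' (fun hc => ht (by rw [show t = t' from hc]; exact ht'))]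
        · have hpf : p.filter (fun y => y.2.1 == t) = [] := by
            rw [List.filter_eq_nil_iff]
            intro y hy
            simp only [beq_iff_eq]
            intro hc
            exact ht (by rw [hks, PySem.List.dedup_eq_ofList, PySem.Set.mem_ofList, ← hc]
                         exact List.mem_map_of_mem hy)
          have : altInner (p ++ [(n, t, f)]) t = [(f, [n])] := by
            unfold altInner
            rw [filter_append_eq p _ t rfl, hpf, List.nil_append]
            show (PySem.List.dedup [f]).map _ = _
            rw [show PySem.List.dedup [f] = [f] from rfl]
            simp only [List.map_cons, List.map_nil]
            rw [show altNames (p ++ [(n, t, f)]) t f = altNames p t f ++ [n] from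
              altNames_append_eq p _ rfl rfl]
            rw [altNames_nil_of_not_mem p t f (by rw [hpf]; simp)]
            rfl
          simp [Function.comp, this]

-- ===== VERDICT (by name: the statement is the Claim_ definition above) =====
theorem parse_spec : Claim_equal_parse := by
  intro genotype _ _
  show parse genotype = parse_alt genotype
  unfold parse parse_alt
  have hstep : genotype.foldl parseStep PySem.Dict.empty
      = (altTriples genotype).foldl tstep PySem.Dict.empty := by
    unfold altTriples
    rw [List.foldl_map]
    rfl
  rw [hstep, fold_eq, fromN, List.map_map]
  simp [Function.comp]
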